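-- pv_equiv track=rewrite | github.com/orzmlx/Chinamobile | utils/huaweiutils.py | is_lists_of_same_length
-- ===== SOURCE A (Python) =====
-- def is_lists_of_same_length(dict_obj):
--     """
--     判断字典对应的列表是否都是相同长度，如果都相同，那么返回这个长度
--     :param dict_obj:
--     :return: int
--     """
--     if len(dict_obj) == 0:
--         return 0
--     first_key = next(iter(dict_obj))
--     first_length = len(dict_obj[first_key])
--     if all(len(dict_obj[key]) == first_length for key in dict_obj):
--         return first_length
--     else:
--         return -1
-- ===== SOURCE B (Python) =====
-- def is_lists_of_same_length(dict_obj):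
--     """
--     判断字典对应的列表是否都是相同长度，如果都相同，那么返回这个长度
--     :param dict_obj:
--     :return: int
--     """
--     lengths = {len(dict_obj[k]) for k in dict_obj}
--     if not lengths:
--         return 0
--     if len(lengths) == 1:
--         return next(iter(lengths))
--     return -1
-- ===== Notes on version B (the rewrite author's own statement) =====
-- stated objective: simpler
-- what changed: Replaces 'remember the first length and compare every other length to it with all()' by collecting the set of all distinct lengths in one pass and deciding by the set's cardinality (0 -> 0, 1 -> the unique length, else -1).
import Mathlib
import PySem

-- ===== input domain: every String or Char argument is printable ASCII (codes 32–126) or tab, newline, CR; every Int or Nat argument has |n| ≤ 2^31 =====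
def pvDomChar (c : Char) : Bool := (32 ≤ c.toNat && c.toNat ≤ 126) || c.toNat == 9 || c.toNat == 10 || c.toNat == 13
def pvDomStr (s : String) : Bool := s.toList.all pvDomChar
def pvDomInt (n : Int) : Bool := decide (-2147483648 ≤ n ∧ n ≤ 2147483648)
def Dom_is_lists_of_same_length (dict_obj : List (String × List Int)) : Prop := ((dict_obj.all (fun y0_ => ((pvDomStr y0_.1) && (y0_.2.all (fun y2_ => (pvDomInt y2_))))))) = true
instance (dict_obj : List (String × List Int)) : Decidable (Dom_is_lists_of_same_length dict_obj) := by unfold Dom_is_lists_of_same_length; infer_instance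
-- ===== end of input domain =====

-- B replaces A's "compare every length to the first" all()-scan by collecting the set of
-- distinct lengths and deciding by its cardinality; simpler, same O(n) cost.


-- len(dict_obj[k]) : the dict is the association list; lookup is first match (keys of a Python dict are unique)
def pvLen (dict_obj : List (String × List Int)) (k : String) : Int :=
  ((dict_obj.lookup k).getD []).length

-- ===== PORT A =====
def is_lists_of_same_length (dict_obj : List (String × List Int)) : Int :=
  match dict_obj with
  | [] => 0                               -- if len(dict_obj) == 0: return 0
  | (first_key, _) :: _ =>                -- first_key = next(iter(dict_obj))
    let first_length := pvLen dict_obj first_key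
    if dict_obj.all (fun p => pvLen dict_obj p.1 == first_length) then first_length
    else -1

-- ===== PORT B =====
def is_lists_of_same_length_alt (dict_obj : List (String × List Int)) : Int :=
  let lengths : PySem.Set Int := PySem.Set.ofList (dict_obj.map (fun p => pvLen dict_obj p.1))
  match lengths with
  | [] => 0
  | [l] => l                              -- len(lengths) == 1: next(iter(lengths))
  | _ => -1

-- ===== PRECONDITION & SPEC =====
def Spec_is_lists_of_same_length (dict_obj : List (String × List Int)) (out : Int) : Prop := out = is_lists_of_same_length_alt dict_obj
instance (dict_obj : List (String × List Int)) (out : Int) : Decidable (Spec_is_lists_of_same_length dict_obj out) := by unfold Spec_is_lists_of_same_length; infer_instance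

-- ===== CLAIM (what is proved, stated in full; the proofs are below) =====
def Claim_equal_is_lists_of_same_length : Prop := ∀ (dict_obj : List (String × List Int)), Dom_is_lists_of_same_length dict_obj → Spec_is_lists_of_same_length dict_obj (is_lists_of_same_length dict_obj)

-- ===== LEMMAS AND PROOFS =====

-- the distinct-lengths set is a singleton {a} exactly when every length in the list is a
lemma ofList_singleton_iff (l : List Int) (a : Int) :
    PySem.Set.ofList (a :: l) = [a] ↔ ∀ x ∈ l, x = a := by
  rw [PySem.Set.ofList_cons]
  constructor
  · intro h x hx
    by_contra hne
    have hx' : x ∈ PySem.Set.discard (PySem.Set.ofList l) a := by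
      rw [PySem.Set.mem_discard]
      exact ⟨(PySem.Set.mem_ofList _ _).2 hx, hne⟩
    simp only [List.cons.injEq] at h
    rw [h.2] at hx'
    simp at hx'
  · intro h
    have : PySem.Set.discard (PySem.Set.ofList l) a = [] := by
      apply List.eq_nil_iff_forall_not_mem.2
      intro x hx
      rw [PySem.Set.mem_discard, PySem.Set.mem_ofList] at hx
      exact hx.2 (h x hx.1)
    rw [this]

-- ===== VERDICT (by name: the statement is the Claim_ definition above) =====
theorem is_lists_of_same_length_spec : Claim_equal_is_lists_of_same_length := by
  intro dict_obj _
  unfold Spec_is_lists_of_same_length is_lists_of_same_length is_lists_of_same_length_alt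
  match dict_obj with
  | [] => rfl
  | (k, v) :: rest =>
    simp only [List.map_cons]
    set d := (k, v) :: rest with hd
    set a := pvLen d k with ha
    set l := rest.map (fun p => pvLen d p.1) with hl
    by_cases hall : ∀ x ∈ l, x = a
    · have hset : PySem.Set.ofList (a :: l) = [a] := (ofList_singleton_iff l a).2 hall
      have hcond : d.all (fun p => pvLen d p.1 == a) = true := by
        rw [hd, List.all_cons]
        simp only [Bool.and_eq_true, beq_iff_eq, List.all_eq_true]
        refine ⟨by rw [← hd, ← ha], fun p hp => ?_⟩
        rw [← hd]; exact hall _ (by rw [hl]; exact List.mem_map_of_mem hp)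
      rw [hset]
      simp [hcond]
    · have hcond : d.all (fun p => pvLen d p.1 == a) = false := by
      -- some length differs from the first
        push Not at hall
        obtain ⟨x, hx, hxne⟩ := hall
        rw [hl] at hx
        obtain ⟨p, hp, hpx⟩ := List.mem_map.1 hx
        simp only [List.all_eq_false]
        exact ⟨p, by rw [hd]; exact List.mem_cons_of_mem _ hp, by simp [hpx, hxne]⟩
      rw [PySem.Set.ofList_cons]
      have hne : PySem.Set.discard (PySem.Set.ofList l) a ≠ [] := by
        push Not at hall
        obtain ⟨x, hx, hxne⟩ := hall
        intro hnil
        have : x ∈ PySem.Set.discard (PySem.Set.ofList l) a := by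
          rw [PySem.Set.mem_discard, PySem.Set.mem_ofList]
          exact ⟨hx, hxne⟩
        rw [hnil] at this
        simp at this
      match hD : PySem.Set.discard (PySem.Set.ofList l) a with
      | [] => exact absurd hD hne
      | _ :: _ => simp [hcond]
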